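-- pv_equiv track=rewrite | github.com/NormPlum/freeCodeCamp_DailyCodingChallenges | 265.py | get_deepest_brackets
-- ===== SOURCE A (Python) =====
-- def get_deepest_brackets(s):
--     open_brackets = 0
--     current_word = ""
--     deepest = 0
--     result = ""
--
--     for char in s:
--         if char in ["[", "{", "("]:
--             open_brackets += 1
--             current_word = ""
--         elif char in ["]", "}", ")"]:
--             if open_brackets > deepest:
--                 deepest = open_brackets
--                 result = current_word
--             open_brackets -= 1
--             current_word = ""
--         else:
--             current_word += char
--
--     return result
-- ===== SOURCE B (Python) =====
-- def get_deepest_brackets(s):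
--     OPEN = "[{("
--     CLOSE = "]})"
--     # Pass 1: maximum bracket depth observed at any closing bracket.
--     depth = 0
--     maxd = 0
--     for c in s:
--         if c in OPEN:
--             depth += 1
--         elif c in CLOSE:
--             if depth > maxd:
--                 maxd = depth
--             depth -= 1
--     if maxd == 0:
--         return ""
--     # Pass 2: word immediately before the first closing bracket at depth maxd.
--     depth = 0
--     word = ""
--     for c in s:
--         if c in OPEN:
--             depth += 1
--             word = ""
--         elif c in CLOSE:
--             if depth == maxd:
--                 return word
--             depth -= 1
--             word = ""
--         else:
--             word += c
--     return ""
-- ===== Notes on version B (the rewrite author's own statement) =====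
-- stated objective: faster
-- what changed: B replaces A's single online scan carrying (deepest, result) with two staged passes: a first pass that only counts depth (no word accumulation) to find the maximum depth at a closing bracket, and a second pass that early-returns the word preceding the first closing bracket at that depth.
import Mathlib
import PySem

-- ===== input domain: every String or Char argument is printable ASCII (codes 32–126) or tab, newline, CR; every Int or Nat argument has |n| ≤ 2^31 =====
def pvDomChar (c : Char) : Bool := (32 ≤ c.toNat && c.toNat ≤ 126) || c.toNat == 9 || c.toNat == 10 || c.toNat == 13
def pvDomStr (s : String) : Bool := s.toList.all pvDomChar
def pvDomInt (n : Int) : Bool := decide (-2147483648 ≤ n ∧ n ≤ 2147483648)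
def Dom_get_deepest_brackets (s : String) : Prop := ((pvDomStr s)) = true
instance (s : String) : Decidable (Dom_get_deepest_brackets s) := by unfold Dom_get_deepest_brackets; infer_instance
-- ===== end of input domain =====

-- B splits A's online scan into two staged passes: find the max close-depth, then find the word before the first close at that depth. Constant-factor faster (pass 1 builds no words; pass 2 early-returns), measured.

-- ===== PORT A =====
-- state: (open_brackets, current_word, deepest, result); words as List Char, String.mk at the end
def stepA (st : Int × List Char × Int × List Char) (c : Char) : Int × List Char × Int × List Char :=
  if c = '[' ∨ c = '{' ∨ c = '(' then (st.1 + 1, [], st.2.2.1, st.2.2.2)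
  else if c = ']' ∨ c = '}' ∨ c = ')' then
    (if st.1 > st.2.2.1 then (st.1 - 1, [], st.1, st.2.1) else (st.1 - 1, [], st.2.2.1, st.2.2.2))
  else (st.1, st.2.1 ++ [c], st.2.2.1, st.2.2.2)

def get_deepest_brackets (s : String) : String :=
  String.mk (s.toList.foldl stepA (0, [], 0, [])).2.2.2

-- ===== PORT B =====
def isOpenB (c : Char) : Bool := c == '[' || c == '{' || c == '('
def isCloseB (c : Char) : Bool := c == ']' || c == '}' || c == ')'

-- pass 1: maximum depth observed at a closing bracket
def maxDepth : List Char → Int → Int → Int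
  | [], _, m => m
  | c :: l, d, m =>
    if isOpenB c then maxDepth l (d + 1) m
    else if isCloseB c then maxDepth l (d - 1) (if d > m then d else m)
    else maxDepth l d m

-- pass 2: word immediately before the first closing bracket at depth md (early return)
def findWord : List Char → Int → Int → List Char → String
  | [], _, _, _ => ""
  | c :: l, md, d, w =>
    if isOpenB c then findWord l md (d + 1) []
    else if isCloseB c then
      if d = md then String.mk w else findWord l md (d - 1) []
    else findWord l md d (w ++ [c])

def get_deepest_brackets_alt (s : String) : String :=
  let md := maxDepth s.toList 0 0
  if md = 0 then "" else findWord s.toList md 0 []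

-- ===== PRECONDITION & SPEC =====
def Spec_get_deepest_brackets (s : String) (out : String) : Prop := out = get_deepest_brackets_alt s
instance (s : String) (out : String) : Decidable (Spec_get_deepest_brackets s out) := by unfold Spec_get_deepest_brackets; infer_instance

-- ===== CLAIM (what is proved, stated in full; the proofs are below) =====
def Claim_equal_get_deepest_brackets : Prop := ∀ (s : String), Dom_get_deepest_brackets s → Spec_get_deepest_brackets s (get_deepest_brackets s)

-- ===== LEMMAS AND PROOFS =====

lemma maxDepth_mono : ∀ (l : List Char) (d m : Int), m ≤ maxDepth l d m := by
  intro l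
  induction l with
  | nil => intro d m; simp [maxDepth]
  | cons c l ih =>
    intro d m
    simp only [maxDepth]
    by_cases h1 : isOpenB c
    · simp only [if_pos h1]; exact ih (d + 1) m
    · by_cases h2 : isCloseB c
      · simp only [if_neg h1, if_pos h2]
        refine le_trans ?_ (ih (d - 1) (if d > m then d else m))
        split_ifs <;> omega
      · simp only [if_neg h1, if_neg h2]; exact ih d m

-- A's fold from a general state, characterised by B's two passes
lemma main_rel : ∀ (l : List Char) (d m : Int) (w r : List Char),
    (l.foldl stepA (d, w, m, r)).2.2.1 = maxDepth l d m ∧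
    String.mk (l.foldl stepA (d, w, m, r)).2.2.2 =
      (if maxDepth l d m = m then String.mk r else findWord l (maxDepth l d m) d w) := by
  intro l
  induction l with
  | nil => intro d m w r; simp [maxDepth, findWord]
  | cons c l ih =>
    intro d m w r
    by_cases hop : c = '[' ∨ c = '{' ∨ c = '('
    · have hb : isOpenB c = true := by rcases hop with h | h | h <;> simp [isOpenB, h]
      simp only [List.foldl_cons, stepA, if_pos hop, maxDepth, findWord, hb]
      exact ih (d + 1) m [] r
    · by_cases hcl : c = ']' ∨ c = '}' ∨ c = ')'
      · have hb : isCloseB c = true := by rcases hcl with h | h | h <;> simp [isCloseB, h]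
        have hnb : isOpenB c = false := by
          rcases hcl with h | h | h <;> simp [isOpenB, h]
        simp only [List.foldl_cons, stepA, if_neg hop, if_pos hcl, maxDepth, findWord, hb, hnb,
          Bool.false_eq_true, if_false, if_true]
        by_cases hd : d > m
        · simp only [if_pos hd]
          obtain ⟨ih1, ih2⟩ := ih (d - 1) d [] w
          have hM : d ≤ maxDepth l (d - 1) d := maxDepth_mono l (d - 1) d
          refine ⟨ih1, ?_⟩
          rw [ih2]
          by_cases he : maxDepth l (d - 1) d = d
          · rw [if_pos he, if_neg (by omega), he, if_pos rfl]
          · rw [if_neg he, if_neg (by omega), if_neg (by omega)]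
        · simp only [if_neg hd]
          obtain ⟨ih1, ih2⟩ := ih (d - 1) m [] r
          have hM : m ≤ maxDepth l (d - 1) m := maxDepth_mono l (d - 1) m
          refine ⟨ih1, ?_⟩
          rw [ih2]
          by_cases he : maxDepth l (d - 1) m = m
          · rw [if_pos he, if_pos he]
          · rw [if_neg he, if_neg he, if_neg (by omega)]
      · have hb1 : isOpenB c = false := by
          simp only [isOpenB, Bool.or_eq_false_iff, beq_eq_false_iff_ne, ne_eq]
          exact ⟨⟨fun h => hop (Or.inl h), fun h => hop (Or.inr (Or.inl h))⟩,
            fun h => hop (Or.inr (Or.inr h))⟩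
        have hb2 : isCloseB c = false := by
          simp only [isCloseB, Bool.or_eq_false_iff, beq_eq_false_iff_ne, ne_eq]
          exact ⟨⟨fun h => hcl (Or.inl h), fun h => hcl (Or.inr (Or.inl h))⟩,
            fun h => hcl (Or.inr (Or.inr h))⟩
        simp only [List.foldl_cons, stepA, if_neg hop, if_neg hcl, maxDepth, findWord, hb1, hb2,
          Bool.false_eq_true, if_false]
        exact ih d m (w ++ [c]) r

-- ===== VERDICT (by name: the statement is the Claim_ definition above) =====
theorem get_deepest_brackets_spec : Claim_equal_get_deepest_brackets := by
  intro s _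
  unfold Spec_get_deepest_brackets get_deepest_brackets get_deepest_brackets_alt
  show String.mk (s.toList.foldl stepA (0, [], 0, [])).2.2.2 =
    if maxDepth s.toList 0 0 = 0 then "" else findWord s.toList (maxDepth s.toList 0 0) 0 []
  obtain ⟨-, h2⟩ := main_rel s.toList 0 0 [] []
  rw [h2]
  by_cases he : maxDepth s.toList 0 0 = 0
  · rw [if_pos he, if_pos he]; rfl
  · rw [if_neg he, if_neg he]
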